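-- pv_equiv track=rewrite | github.com/grevicoc/topological-sort-implementation | header.py | findNull
-- ===== SOURCE A (Python) =====
-- def deleteEdges(verticeDeleted,rawGraph):
--     counter = 0
--     verticeWillDeleted = []
--
--     for unit in rawGraph:
--         if (verticeDeleted in rawGraph.get(unit)):
--             indexToBeDeleted = rawGraph.get(unit).index(verticeDeleted)
--             del rawGraph[unit][indexToBeDeleted]
--             # if (len(rawGraph.get(unit))==0):
--             #     counter+=1
--             #     verticeWillDeleted.append(unit)
--
--     for i in range (counter):
--         del rawGraph[verticeWillDeleted[0]]
--
-- def findNull(rawGraph):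
--     returnArray = []
--     counter=0
--     for unit in rawGraph:
--         if (len(rawGraph.get(unit))==0):
--             returnArray = returnArray + [unit]
--             counter+=1
--
--     #del vertice
--     for i in range(counter):
--         del rawGraph[returnArray[i]]
--
--     #del edge
--     for i in range(counter):
--         deleteEdges(returnArray[i],rawGraph)
--
--     return returnArray
-- ===== SOURCE B (Python) =====
-- def findNull(rawGraph):
--     # One pass to collect the sinks, then delete them and filter every
--     # remaining adjacency list once against a hash set: O(V+E) overall.
--     # (Side effect on duplicate edges differs from the original, which
--     # removes only one occurrence per sink; the return value is identical.)
--     sinks = [u for u, nbrs in rawGraph.items() if not nbrs]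
--     dead = set(sinks)
--     for u in sinks:
--         del rawGraph[u]
--     if dead:
--         for u in rawGraph:
--             rawGraph[u] = [w for w in rawGraph[u] if w not in dead]
--     return sinks
-- ===== Notes on version B (the rewrite author's own statement) =====
-- stated objective: simpler
-- what changed: B collects the sinks in one pass reading each pair's value directly instead of re-looking every key up with dict.get, and cleans the remaining adjacency lists in a single sweep against a set of the deleted sinks instead of one full-graph scan per sink; equivalence is about the return value (both mutate the dict; on duplicate edge entries A removes one occurrence per sink, B removes all).
import Mathlib
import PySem

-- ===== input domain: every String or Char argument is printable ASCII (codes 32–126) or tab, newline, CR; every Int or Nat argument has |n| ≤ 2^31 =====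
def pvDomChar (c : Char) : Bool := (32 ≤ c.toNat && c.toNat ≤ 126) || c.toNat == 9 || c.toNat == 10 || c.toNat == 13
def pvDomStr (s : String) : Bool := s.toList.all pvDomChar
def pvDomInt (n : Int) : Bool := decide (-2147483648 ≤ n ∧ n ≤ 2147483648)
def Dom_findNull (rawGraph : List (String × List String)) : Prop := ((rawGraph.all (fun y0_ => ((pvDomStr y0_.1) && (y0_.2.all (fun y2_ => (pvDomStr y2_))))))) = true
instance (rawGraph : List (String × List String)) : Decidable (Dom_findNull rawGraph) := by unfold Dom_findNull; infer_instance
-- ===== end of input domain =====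

-- B is a simpler one-pass rewrite: it reads each pair's value directly instead of a dict.get
-- lookup per key, and sweeps the remaining adjacency lists once against a set of the deleted
-- sinks instead of one full-graph scan per sink. Both Pythons mutate rawGraph; the
-- equivalence proved here is about the RETURN value only (on duplicate edge entries A's
-- mutation removes one occurrence per sink, B's removes all — the returned list is the same).

-- ===== PORT A =====
-- A iterates the dict's keys and looks each key up with rawGraph.get(unit); the key comes
-- from the dict itself, so the lookup succeeds (getD [] is never the missing-key case).
-- The two trailing loops ('del vertice' / 'del edge' via deleteEdges) only mutate rawGraph
-- after returnArray is fully built and cannot affect the returned list; a value-level port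
-- therefore returns returnArray directly.
def findNull (rawGraph : List (String × List String)) : List String :=
  rawGraph.foldl
    (fun acc p =>
      if ((List.lookup p.1 rawGraph).getD []).length == 0 then acc ++ [p.1] else acc)
    []

-- ===== PORT B =====
-- B reads each pair's own value: sinks = [u for u, nbrs in rawGraph.items() if not nbrs].
-- (B's two mutation loops touch only rawGraph and are not part of the returned value.)
def findNull_alt (rawGraph : List (String × List String)) : List String :=
  (rawGraph.filter (fun p => p.2.isEmpty)).map (fun p => p.1)

-- ===== PRECONDITION & SPEC =====
-- Pre_ excludes association lists with duplicate keys: they do not represent any Python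
-- dict (a dict's keys are unique), so A is never run on them; on such lists A's port would
-- look every duplicate up via first-match while B's port reads each pair's own value.
def Pre_findNull (rawGraph : List (String × List String)) : Prop :=
  (rawGraph.map Prod.fst).Nodup
instance (rawGraph : List (String × List String)) : Decidable (Pre_findNull rawGraph) := by
  unfold Pre_findNull; infer_instance

def pvWitness_findNull : (List (String × List String)) := [("a", ["b"]), ("b", [])]

def Spec_findNull (rawGraph : List (String × List String)) (out : List String) : Prop := out = findNull_alt rawGraph
instance (rawGraph : List (String × List String)) (out : List String) : Decidable (Spec_findNull rawGraph out) := by unfold Spec_findNull; infer_instance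

-- ===== CLAIM (what is proved, stated in full; the proofs are below) =====
def Claim_equal_findNull : Prop := ∀ (rawGraph : List (String × List String)), Dom_findNull rawGraph → Pre_findNull rawGraph → Spec_findNull rawGraph (findNull rawGraph)

-- ===== LEMMAS AND PROOFS =====

-- with unique keys, the first-match lookup of a pair's key returns that pair's value
lemma lookup_of_mem_nodup (g : List (String × List String)) (p : String × List String)
    (hnd : (g.map Prod.fst).Nodup) (hp : p ∈ g) : List.lookup p.1 g = some p.2 := by
  induction g with
  | nil => cases hp
  | cons q t ih =>
    simp only [List.map_cons, List.nodup_cons] at hnd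
    rcases List.mem_cons.mp hp with h | h
    · subst h; simp [List.lookup]
    · have hne : p.1 ≠ q.1 := fun e => hnd.1 (e ▸ List.mem_map_of_mem h)
      have hb : (p.1 == q.1) = false := beq_eq_false_iff_ne.mpr hne
      simp only [List.lookup, hb]
      exact ih hnd.2 h

-- the accumulate-if-empty fold equals filter-then-map, provided the tested condition
-- agrees with p.2.isEmpty on every member of the traversed list
lemma foldl_if_eq_filter_map (c : String × List String → Bool) :
    ∀ (l : List (String × List String)) (acc : List String),
      (∀ p ∈ l, c p = p.2.isEmpty) →
      l.foldl (fun acc p => if c p then acc ++ [p.1] else acc) acc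
        = acc ++ (l.filter (fun p => p.2.isEmpty)).map (fun p => p.1) := by
  intro l
  induction l with
  | nil => simp
  | cons q t ih =>
    intro acc h
    simp only [List.foldl_cons, List.filter_cons]
    rw [h q (List.mem_cons_self ..)]
    by_cases hq : q.2.isEmpty
    · rw [if_pos hq, if_pos hq, ih _ (fun p hp => h p (List.mem_cons_of_mem _ hp))]
      simp
    · rw [if_neg hq, if_neg hq, ih _ (fun p hp => h p (List.mem_cons_of_mem _ hp))]

-- ===== VERDICT (by name: the statement is the Claim_ definition above) =====
theorem findNull_spec : Claim_equal_findNull := by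
  intro g _ hpre
  unfold Spec_findNull findNull findNull_alt
  rw [foldl_if_eq_filter_map _ g []
      (fun p hp => by
        rw [lookup_of_mem_nodup g p hpre hp]
        obtain ⟨k, v⟩ := p
        cases v <;> simp)]
  simp
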